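-- pv_equiv track=rewrite | github.com/abyasham/xplainable-pcap-analyzer-lightrag | src/pcap_processor.py | _are_attacks_related
-- ===== SOURCE A (Python) =====
-- def _are_attacks_related(attack1: str, attack2: str) -> bool:
--     """Check if two attack types are related"""
--
--     related_groups = [
--         ['sql_injection_attempt', 'xss_attempt', 'directory_traversal'],  # Web attacks
--         ['arp_poisoning', 'port_scanning', 'dns_tunneling'],  # Network attacks
--         ['token_injection', 'authentication_bypass', 'privilege_escalation'],  # Auth attacks
--         ['command_injection', 'privilege_escalation', 'lateral_movement']  # System attacks
--     ]
--
--     for group in related_groups: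
--         if attack1 in group and attack2 in group:
--             return True
--
--     return False
-- ===== SOURCE B (Python) =====
-- def _are_attacks_related(attack1: str, attack2: str) -> bool:
--     """Check if two attack types are related (inverted-index formulation)"""
--
--     related_groups = [
--         ['sql_injection_attempt', 'xss_attempt', 'directory_traversal'],  # Web attacks
--         ['arp_poisoning', 'port_scanning', 'dns_tunneling'],  # Network attacks
--         ['token_injection', 'authentication_bypass', 'privilege_escalation'],  # Auth attacks
--         ['command_injection', 'privilege_escalation', 'lateral_movement']  # System attacks
--     ]
--
--     index = {}
--     for i, group in enumerate(related_groups):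
--         for attack in group:
--             index.setdefault(attack, set()).add(i)
--
--     return bool(index.get(attack1, frozenset()) & index.get(attack2, frozenset()))
-- ===== Notes on version B (the rewrite author's own statement) =====
-- stated objective: alternative
-- what changed: Replaces A's per-call scan checking both attacks against each of the four groups by building an inverted index mapping every attack name to the set of group indices containing it (accumulating, so 'privilege_escalation' keeps both groups) and returning whether the two attacks' index sets intersect, with an empty-set default for unknown names.
import Mathlib
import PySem

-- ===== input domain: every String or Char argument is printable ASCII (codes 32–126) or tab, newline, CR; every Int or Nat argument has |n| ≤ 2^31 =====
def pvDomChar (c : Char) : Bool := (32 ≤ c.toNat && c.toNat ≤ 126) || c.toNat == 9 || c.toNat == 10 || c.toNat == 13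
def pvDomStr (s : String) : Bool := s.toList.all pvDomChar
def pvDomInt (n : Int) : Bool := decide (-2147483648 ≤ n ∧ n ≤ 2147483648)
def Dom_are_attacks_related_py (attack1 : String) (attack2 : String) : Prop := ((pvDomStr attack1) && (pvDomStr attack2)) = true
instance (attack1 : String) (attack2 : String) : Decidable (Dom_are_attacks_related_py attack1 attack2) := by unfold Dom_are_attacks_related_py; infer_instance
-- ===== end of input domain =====

-- B replaces A's per-call scan over the four groups by an inverted index (attack → set of
-- group indices) built once, answering by intersecting the two attacks' index sets (objective: alternative).

-- ===== PORT A =====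
def pvRelatedGroups : List (List String) :=
  [["sql_injection_attempt", "xss_attempt", "directory_traversal"],
   ["arp_poisoning", "port_scanning", "dns_tunneling"],
   ["token_injection", "authentication_bypass", "privilege_escalation"],
   ["command_injection", "privilege_escalation", "lateral_movement"]]

-- A's 'for group in related_groups: if attack1 in group and attack2 in group: return True', as structural recursion
def pvLoopA (attack1 : String) (attack2 : String) : List (List String) → Bool
  | [] => false
  | g :: rest =>
      if g.contains attack1 && g.contains attack2 then true
      else pvLoopA attack1 attack2 rest

def are_attacks_related_py (attack1 : String) (attack2 : String) : Bool :=
  pvLoopA attack1 attack2 pvRelatedGroups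

-- ===== PORT B =====
-- index = {}; for i, group in enumerate(related_groups): for attack in group: index.setdefault(attack, set()).add(i)
def pvIndex : PySem.Dict String (PySem.Set Int) :=
  (PySem.List.enumerate pvRelatedGroups).foldl
    (fun d p => p.2.foldl
      (fun d attack => d.modify attack PySem.Set.empty (fun s => PySem.Set.add s p.1)) d)
    PySem.Dict.empty

-- return bool(index.get(attack1, frozenset()) & index.get(attack2, frozenset()))
def are_attacks_related_py_alt (attack1 : String) (attack2 : String) : Bool :=
  !(PySem.Set.inter (pvIndex.getD attack1 PySem.Set.empty)
      (pvIndex.getD attack2 PySem.Set.empty)).isEmpty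

-- ===== PRECONDITION & SPEC =====
def Spec_are_attacks_related_py (attack1 : String) (attack2 : String) (out : Bool) : Prop := out = are_attacks_related_py_alt attack1 attack2
instance (attack1 : String) (attack2 : String) (out : Bool) : Decidable (Spec_are_attacks_related_py attack1 attack2 out) := by unfold Spec_are_attacks_related_py; infer_instance

-- ===== CLAIM (what is proved, stated in full; the proofs are below) =====
def Claim_equal_are_attacks_related_py : Prop := ∀ (attack1 : String) (attack2 : String), Dom_are_attacks_related_py attack1 attack2 → Spec_are_attacks_related_py attack1 attack2 (are_attacks_related_py attack1 attack2)

-- ===== LEMMAS AND PROOFS =====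

-- the inverted index, evaluated to its literal value ('privilege_escalation' collects both of its groups)
theorem pvIndex_eq : pvIndex = PySem.Dict.mk
  [("sql_injection_attempt", [0]), ("xss_attempt", [0]), ("directory_traversal", [0]),
   ("arp_poisoning", [1]), ("port_scanning", [1]), ("dns_tunneling", [1]),
   ("token_injection", [2]), ("authentication_bypass", [2]), ("privilege_escalation", [2,3]),
   ("command_injection", [3]), ("lateral_movement", [3])] := by decide

-- closed-form characterisation of a lookup in the index, for ANY string
def pvLookup (s : String) : List Int :=
  if s = "sql_injection_attempt" then [0] else if s = "xss_attempt" then [0]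
  else if s = "directory_traversal" then [0] else if s = "arp_poisoning" then [1]
  else if s = "port_scanning" then [1] else if s = "dns_tunneling" then [1]
  else if s = "token_injection" then [2] else if s = "authentication_bypass" then [2]
  else if s = "privilege_escalation" then [2,3] else if s = "command_injection" then [3]
  else if s = "lateral_movement" then [3] else []

theorem lookup_eq (s : String) : pvIndex.getD s PySem.Set.empty = pvLookup s := by
  by_cases h0 : s = "sql_injection_attempt"
  · subst h0; decide
  by_cases h1 : s = "xss_attempt"
  · subst h1; decide
  by_cases h2 : s = "directory_traversal"
  · subst h2; decide
  by_cases h3 : s = "arp_poisoning"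
  · subst h3; decide
  by_cases h4 : s = "port_scanning"
  · subst h4; decide
  by_cases h5 : s = "dns_tunneling"
  · subst h5; decide
  by_cases h6 : s = "token_injection"
  · subst h6; decide
  by_cases h7 : s = "authentication_bypass"
  · subst h7; decide
  by_cases h8 : s = "privilege_escalation"
  · subst h8; decide
  by_cases h9 : s = "command_injection"
  · subst h9; decide
  by_cases h10 : s = "lateral_movement"
  · subst h10; decide
  simp [pvIndex_eq, pvLookup, PySem.Dict.getD, PySem.Dict.get?, h0, h1, h2, h3, h4, h5, h6, h7, h8, h9, h10, Ne.symm h0, Ne.symm h1, Ne.symm h2, Ne.symm h3, Ne.symm h4, Ne.symm h5, Ne.symm h6, Ne.symm h7, Ne.symm h8, Ne.symm h9, Ne.symm h10]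

theorem pvLoop_eq_inter (a1 a2 : String) : are_attacks_related_py a1 a2 = are_attacks_related_py_alt a1 a2 := by
  unfold are_attacks_related_py are_attacks_related_py_alt
  rw [lookup_eq, lookup_eq]
  by_cases g0 : a1 = "sql_injection_attempt"
  · subst g0
    by_cases h0 : a2 = "sql_injection_attempt"
    · subst h0; decide
    by_cases h1 : a2 = "xss_attempt"
    · subst h1; decide
    by_cases h2 : a2 = "directory_traversal"
    · subst h2; decide
    by_cases h3 : a2 = "arp_poisoning"
    · subst h3; decide
    by_cases h4 : a2 = "port_scanning"
    · subst h4; decide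
    by_cases h5 : a2 = "dns_tunneling"
    · subst h5; decide
    by_cases h6 : a2 = "token_injection"
    · subst h6; decide
    by_cases h7 : a2 = "authentication_bypass"
    · subst h7; decide
    by_cases h8 : a2 = "privilege_escalation"
    · subst h8; decide
    by_cases h9 : a2 = "command_injection"
    · subst h9; decide
    by_cases h10 : a2 = "lateral_movement"
    · subst h10; decide
    simp [pvLoopA, pvRelatedGroups, pvLookup, PySem.Set.inter, h0, h1, h2, h3, h4, h5, h6, h7, h8, h9, h10]
  by_cases g1 : a1 = "xss_attempt"
  · subst g1
    by_cases h0 : a2 = "sql_injection_attempt"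
    · subst h0; decide
    by_cases h1 : a2 = "xss_attempt"
    · subst h1; decide
    by_cases h2 : a2 = "directory_traversal"
    · subst h2; decide
    by_cases h3 : a2 = "arp_poisoning"
    · subst h3; decide
    by_cases h4 : a2 = "port_scanning"
    · subst h4; decide
    by_cases h5 : a2 = "dns_tunneling"
    · subst h5; decide
    by_cases h6 : a2 = "token_injection"
    · subst h6; decide
    by_cases h7 : a2 = "authentication_bypass"
    · subst h7; decide
    by_cases h8 : a2 = "privilege_escalation"
    · subst h8; decide
    by_cases h9 : a2 = "command_injection"
    · subst h9; decide
    by_cases h10 : a2 = "lateral_movement"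
    · subst h10; decide
    simp [pvLoopA, pvRelatedGroups, pvLookup, PySem.Set.inter, h0, h1, h2, h3, h4, h5, h6, h7, h8, h9, h10]
  by_cases g2 : a1 = "directory_traversal"
  · subst g2
    by_cases h0 : a2 = "sql_injection_attempt"
    · subst h0; decide
    by_cases h1 : a2 = "xss_attempt"
    · subst h1; decide
    by_cases h2 : a2 = "directory_traversal"
    · subst h2; decide
    by_cases h3 : a2 = "arp_poisoning"
    · subst h3; decide
    by_cases h4 : a2 = "port_scanning"
    · subst h4; decide
    by_cases h5 : a2 = "dns_tunneling"
    · subst h5; decide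
    by_cases h6 : a2 = "token_injection"
    · subst h6; decide
    by_cases h7 : a2 = "authentication_bypass"
    · subst h7; decide
    by_cases h8 : a2 = "privilege_escalation"
    · subst h8; decide
    by_cases h9 : a2 = "command_injection"
    · subst h9; decide
    by_cases h10 : a2 = "lateral_movement"
    · subst h10; decide
    simp [pvLoopA, pvRelatedGroups, pvLookup, PySem.Set.inter, h0, h1, h2, h3, h4, h5, h6, h7, h8, h9, h10]
  by_cases g3 : a1 = "arp_poisoning"
  · subst g3
    by_cases h0 : a2 = "sql_injection_attempt"
    · subst h0; decide
    by_cases h1 : a2 = "xss_attempt"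
    · subst h1; decide
    by_cases h2 : a2 = "directory_traversal"
    · subst h2; decide
    by_cases h3 : a2 = "arp_poisoning"
    · subst h3; decide
    by_cases h4 : a2 = "port_scanning"
    · subst h4; decide
    by_cases h5 : a2 = "dns_tunneling"
    · subst h5; decide
    by_cases h6 : a2 = "token_injection"
    · subst h6; decide
    by_cases h7 : a2 = "authentication_bypass"
    · subst h7; decide
    by_cases h8 : a2 = "privilege_escalation"
    · subst h8; decide
    by_cases h9 : a2 = "command_injection"
    · subst h9; decide
    by_cases h10 : a2 = "lateral_movement"
    · subst h10; decide
    simp [pvLoopA, pvRelatedGroups, pvLookup, PySem.Set.inter, h0, h1, h2, h3, h4, h5, h6, h7, h8, h9, h10]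
  by_cases g4 : a1 = "port_scanning"
  · subst g4
    by_cases h0 : a2 = "sql_injection_attempt"
    · subst h0; decide
    by_cases h1 : a2 = "xss_attempt"
    · subst h1; decide
    by_cases h2 : a2 = "directory_traversal"
    · subst h2; decide
    by_cases h3 : a2 = "arp_poisoning"
    · subst h3; decide
    by_cases h4 : a2 = "port_scanning"
    · subst h4; decide
    by_cases h5 : a2 = "dns_tunneling"
    · subst h5; decide
    by_cases h6 : a2 = "token_injection"
    · subst h6; decide
    by_cases h7 : a2 = "authentication_bypass"
    · subst h7; decide
    by_cases h8 : a2 = "privilege_escalation"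
    · subst h8; decide
    by_cases h9 : a2 = "command_injection"
    · subst h9; decide
    by_cases h10 : a2 = "lateral_movement"
    · subst h10; decide
    simp [pvLoopA, pvRelatedGroups, pvLookup, PySem.Set.inter, h0, h1, h2, h3, h4, h5, h6, h7, h8, h9, h10]
  by_cases g5 : a1 = "dns_tunneling"
  · subst g5
    by_cases h0 : a2 = "sql_injection_attempt"
    · subst h0; decide
    by_cases h1 : a2 = "xss_attempt"
    · subst h1; decide
    by_cases h2 : a2 = "directory_traversal"
    · subst h2; decide
    by_cases h3 : a2 = "arp_poisoning"
    · subst h3; decide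
    by_cases h4 : a2 = "port_scanning"
    · subst h4; decide
    by_cases h5 : a2 = "dns_tunneling"
    · subst h5; decide
    by_cases h6 : a2 = "token_injection"
    · subst h6; decide
    by_cases h7 : a2 = "authentication_bypass"
    · subst h7; decide
    by_cases h8 : a2 = "privilege_escalation"
    · subst h8; decide
    by_cases h9 : a2 = "command_injection"
    · subst h9; decide
    by_cases h10 : a2 = "lateral_movement"
    · subst h10; decide
    simp [pvLoopA, pvRelatedGroups, pvLookup, PySem.Set.inter, h0, h1, h2, h3, h4, h5, h6, h7, h8, h9, h10]
  by_cases g6 : a1 = "token_injection"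
  · subst g6
    by_cases h0 : a2 = "sql_injection_attempt"
    · subst h0; decide
    by_cases h1 : a2 = "xss_attempt"
    · subst h1; decide
    by_cases h2 : a2 = "directory_traversal"
    · subst h2; decide
    by_cases h3 : a2 = "arp_poisoning"
    · subst h3; decide
    by_cases h4 : a2 = "port_scanning"
    · subst h4; decide
    by_cases h5 : a2 = "dns_tunneling"
    · subst h5; decide
    by_cases h6 : a2 = "token_injection"
    · subst h6; decide
    by_cases h7 : a2 = "authentication_bypass"
    · subst h7; decide
    by_cases h8 : a2 = "privilege_escalation"
    · subst h8; decide
    by_cases h9 : a2 = "command_injection"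
    · subst h9; decide
    by_cases h10 : a2 = "lateral_movement"
    · subst h10; decide
    simp [pvLoopA, pvRelatedGroups, pvLookup, PySem.Set.inter, h0, h1, h2, h3, h4, h5, h6, h7, h8, h9, h10]
  by_cases g7 : a1 = "authentication_bypass"
  · subst g7
    by_cases h0 : a2 = "sql_injection_attempt"
    · subst h0; decide
    by_cases h1 : a2 = "xss_attempt"
    · subst h1; decide
    by_cases h2 : a2 = "directory_traversal"
    · subst h2; decide
    by_cases h3 : a2 = "arp_poisoning"
    · subst h3; decide
    by_cases h4 : a2 = "port_scanning"
    · subst h4; decide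
    by_cases h5 : a2 = "dns_tunneling"
    · subst h5; decide
    by_cases h6 : a2 = "token_injection"
    · subst h6; decide
    by_cases h7 : a2 = "authentication_bypass"
    · subst h7; decide
    by_cases h8 : a2 = "privilege_escalation"
    · subst h8; decide
    by_cases h9 : a2 = "command_injection"
    · subst h9; decide
    by_cases h10 : a2 = "lateral_movement"
    · subst h10; decide
    simp [pvLoopA, pvRelatedGroups, pvLookup, PySem.Set.inter, h0, h1, h2, h3, h4, h5, h6, h7, h8, h9, h10]
  by_cases g8 : a1 = "privilege_escalation"
  · subst g8
    by_cases h0 : a2 = "sql_injection_attempt"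
    · subst h0; decide
    by_cases h1 : a2 = "xss_attempt"
    · subst h1; decide
    by_cases h2 : a2 = "directory_traversal"
    · subst h2; decide
    by_cases h3 : a2 = "arp_poisoning"
    · subst h3; decide
    by_cases h4 : a2 = "port_scanning"
    · subst h4; decide
    by_cases h5 : a2 = "dns_tunneling"
    · subst h5; decide
    by_cases h6 : a2 = "token_injection"
    · subst h6; decide
    by_cases h7 : a2 = "authentication_bypass"
    · subst h7; decide
    by_cases h8 : a2 = "privilege_escalation"
    · subst h8; decide
    by_cases h9 : a2 = "command_injection"
    · subst h9; decide
    by_cases h10 : a2 = "lateral_movement"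
    · subst h10; decide
    simp [pvLoopA, pvRelatedGroups, pvLookup, PySem.Set.inter, h0, h1, h2, h3, h4, h5, h6, h7, h8, h9, h10]
  by_cases g9 : a1 = "command_injection"
  · subst g9
    by_cases h0 : a2 = "sql_injection_attempt"
    · subst h0; decide
    by_cases h1 : a2 = "xss_attempt"
    · subst h1; decide
    by_cases h2 : a2 = "directory_traversal"
    · subst h2; decide
    by_cases h3 : a2 = "arp_poisoning"
    · subst h3; decide
    by_cases h4 : a2 = "port_scanning"
    · subst h4; decide
    by_cases h5 : a2 = "dns_tunneling"
    · subst h5; decide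
    by_cases h6 : a2 = "token_injection"
    · subst h6; decide
    by_cases h7 : a2 = "authentication_bypass"
    · subst h7; decide
    by_cases h8 : a2 = "privilege_escalation"
    · subst h8; decide
    by_cases h9 : a2 = "command_injection"
    · subst h9; decide
    by_cases h10 : a2 = "lateral_movement"
    · subst h10; decide
    simp [pvLoopA, pvRelatedGroups, pvLookup, PySem.Set.inter, h0, h1, h2, h3, h4, h5, h6, h7, h8, h9, h10]
  by_cases g10 : a1 = "lateral_movement"
  · subst g10
    by_cases h0 : a2 = "sql_injection_attempt"
    · subst h0; decide
    by_cases h1 : a2 = "xss_attempt"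
    · subst h1; decide
    by_cases h2 : a2 = "directory_traversal"
    · subst h2; decide
    by_cases h3 : a2 = "arp_poisoning"
    · subst h3; decide
    by_cases h4 : a2 = "port_scanning"
    · subst h4; decide
    by_cases h5 : a2 = "dns_tunneling"
    · subst h5; decide
    by_cases h6 : a2 = "token_injection"
    · subst h6; decide
    by_cases h7 : a2 = "authentication_bypass"
    · subst h7; decide
    by_cases h8 : a2 = "privilege_escalation"
    · subst h8; decide
    by_cases h9 : a2 = "command_injection"
    · subst h9; decide
    by_cases h10 : a2 = "lateral_movement"
    · subst h10; decide
    simp [pvLoopA, pvRelatedGroups, pvLookup, PySem.Set.inter, h0, h1, h2, h3, h4, h5, h6, h7, h8, h9, h10]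
  simp [pvLoopA, pvRelatedGroups, pvLookup, PySem.Set.inter, g0, g1, g2, g3, g4, g5, g6, g7, g8, g9, g10]

-- ===== VERDICT (by name: the statement is the Claim_ definition above) =====
theorem are_attacks_related_py_spec : Claim_equal_are_attacks_related_py := by
  intro a1 a2 _
  unfold Spec_are_attacks_related_py
  exact pvLoop_eq_inter a1 a2
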